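-- pv_equiv track=rewrite | github.com/DannyWeitekamp/Cognitive-Rule-Engine | cre/conditions.py | flags_not
-- ===== SOURCE A (Python) =====
-- def flags_and(l_flags, r_flags):
--     dnf = [[] for i in range(len(l_flags)*len(r_flags))]
--     for i, l_conjunct in enumerate(l_flags):
--         for j, r_conjunct in enumerate(r_flags):
--             k = i*len(r_flags) + j
--             for x in l_conjunct: dnf[k].append(x)
--             for x in r_conjunct: dnf[k].append(x)
--     return dnf
--
-- def flags_not(flags):
--     dnfs = []
--     for i, conjunct in enumerate(flags):
--         dnf = [[] for i in range(len(conjunct))]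
--         for j, flag in enumerate(conjunct):
--             if(flag[0] == "~"):
--                 flag = flag[1:]
--             else:
--                 flag = f"~{flag}"
--             dnf[j].append(flag)
--         dnfs.append(dnf)
--
--     out_dnf = dnfs[0]
--     for i in range(1,len(dnfs)):
--         out_dnf = flags_and(out_dnf,dnfs[i])
--     return out_dnf
-- ===== SOURCE B (Python) =====
-- def flags_not(flags):
--     # Mixed-radix enumeration: combo #k's choice in conjunct i is digit i of k
--     # (last conjunct least significant), matching A's row-major ordering.
--     n = len(flags)
--     total = 1
--     for conjunct in flags:
--         total *= len(conjunct)
--     out = []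
--     for k in range(total):
--         rem = k
--         combo = []
--         for i in range(n - 1, -1, -1):
--             rem, d = divmod(rem, len(flags[i]))
--             f = flags[i][d]
--             combo.append(f[1:] if f.startswith("~") else "~" + f)
--         combo.reverse()
--         out.append(combo)
--     return out
-- ===== Notes on version B (the rewrite author's own statement) =====
-- stated objective: alternative
-- what changed: B enumerates combination indices 0..total-1 and decodes each index by repeated divmod into one choice per conjunct (mixed-radix decoding), instead of A's pairwise cartesian flags_and folded left over per-conjunct DNFs.
import Mathlib
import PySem

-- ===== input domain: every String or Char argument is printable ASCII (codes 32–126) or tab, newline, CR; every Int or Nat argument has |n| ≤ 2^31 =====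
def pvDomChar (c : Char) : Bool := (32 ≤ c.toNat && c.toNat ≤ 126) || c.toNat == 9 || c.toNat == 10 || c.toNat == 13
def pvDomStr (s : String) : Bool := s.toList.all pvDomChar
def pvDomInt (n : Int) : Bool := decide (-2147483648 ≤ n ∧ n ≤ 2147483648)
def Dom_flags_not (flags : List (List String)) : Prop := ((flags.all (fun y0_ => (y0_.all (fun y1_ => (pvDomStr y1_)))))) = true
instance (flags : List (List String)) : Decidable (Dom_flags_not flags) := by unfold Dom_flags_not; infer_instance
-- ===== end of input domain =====

-- B replaces A's pairwise flags_and fold by mixed-radix enumeration: combo #k is obtained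
-- by decoding k digit-by-digit (alternative decomposition; same cost).


-- ===== PORT A =====
-- flag[0] == "~" ? flag[1:] : "~"+flag  (flag[0] raises IndexError on "", excluded by Pre_;
-- done on the Char list so the kernel can evaluate)
def pvNegA (flag : String) : String :=
  match flag.toList with
  | '~' :: rest => String.ofList rest
  | l => String.ofList ('~' :: l)

-- flags_and: the nested i,j loops fill dnf[i*len(r)+j] with l_conjunct then r_conjunct,
-- i.e. row-major all pairs, each pair concatenated in that order.
def pvFlagsAnd (l_flags r_flags : List (List String)) : List (List String) :=
  l_flags.flatMap (fun lc => r_flags.map (fun rc => lc ++ rc))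

-- the j-loop puts exactly the single negated flag into slot dnf[j]
def flags_not (flags : List (List String)) : List (List String) :=
  let dnfs := flags.map (fun conjunct => conjunct.map (fun flag => [pvNegA flag]))
  -- dnfs[0] raises IndexError when flags == [] (excluded by Pre_); headD [] stands in there
  (dnfs.drop 1).foldl pvFlagsAnd (dnfs.headD [])

-- ===== PORT B =====
-- f[1:] if f.startswith("~") else "~" + f   (on the code-point list)
def pvNegB (f : String) : String :=
  if PySem.Chars.startswith f.toList ['~']
  then String.ofList (PySem.Chars.slice f.toList (some 1) none)
  else String.ofList ('~' :: f.toList)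

-- inner loop: for i in range(n-1,-1,-1): rem, d = divmod(rem, len(flags[i])); combo.append(neg(flags[i][d]))
-- then combo.reverse()   (divmod with a positive divisor is floordiv/mod)
def pvDecodeCombo (flags : List (List String)) (n : Int) (k : Int) : List String :=
  (((PySem.List.pyRange (n - 1) (-1) (-1)).foldl
      (fun (st : Int × List String) i =>
        let c := PySem.List.pyGetD flags i []
        (PySem.Int.floordiv st.1 (c.length : Int),
         st.2 ++ [pvNegB (PySem.List.pyGetD c (PySem.Int.mod st.1 (c.length : Int)) "")]))
      (k, [])).2).reverse

def flags_not_alt (flags : List (List String)) : List (List String) :=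
  let total : Int := flags.foldl (fun t c => t * (c.length : Int)) 1
  (PySem.List.pyRange 0 total 1).foldl
    (fun out k => out ++ [pvDecodeCombo flags (flags.length : Int) k]) []

-- ===== PRECONDITION & SPEC =====
-- Pre_ excludes exactly where A raises IndexError: empty flags (dnfs[0]) and any empty flag string (flag[0]).
def Pre_flags_not (flags : List (List String)) : Prop :=
  flags ≠ [] ∧ ∀ c ∈ flags, ∀ f ∈ c, f ≠ ""
instance (flags : List (List String)) : Decidable (Pre_flags_not flags) := by
  unfold Pre_flags_not; infer_instance
def pvWitness_flags_not : List (List String) := [["~a", "b"], ["c"]]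

def Spec_flags_not (flags : List (List String)) (out : List (List String)) : Prop := out = flags_not_alt flags
instance (flags : List (List String)) (out : List (List String)) : Decidable (Spec_flags_not flags out) := by unfold Spec_flags_not; infer_instance

-- ===== CLAIM =====
def Claim_equal_flags_not : Prop := ∀ (flags : List (List String)), Dom_flags_not flags → Pre_flags_not flags → Spec_flags_not flags (flags_not flags)

-- ===== LEMMAS AND PROOFS =====

-- the two negations agree on every string (even "": both give "~")
theorem pvNeg_eq (f : String) : pvNegA f = pvNegB f := by
  unfold pvNegA pvNegB
  split
  · rename_i rest heq
    have hs : PySem.Chars.startswith f.toList ['~'] = true := by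
      rw [PySem.Chars.startswith_iff, heq]; exact ⟨rest, rfl⟩
    rw [if_pos hs, PySem.Chars.slice_eq_listSlice, PySem.List.slice_from_one, heq]
    simp
  · rename_i hne
    have hs : ¬ PySem.Chars.startswith f.toList ['~'] = true := by
      rw [PySem.Chars.startswith_iff]
      rintro ⟨t, ht⟩
      exact hne t ht.symm
    rw [if_neg hs]

-- specification product (proof helper): cartesian product, first list slowest-varying
def pvProd : List (List String) → List (List String)
  | [] => [[]]
  | c :: cs => c.flatMap (fun x => (pvProd cs).map (fun rest => x :: rest))

-- the decode-loop body, named for the proofs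
def pvStep (flags : List (List String)) (st : Int × List String) (i : Int) : Int × List String :=
  let c := PySem.List.pyGetD flags i []
  (PySem.Int.floordiv st.1 (c.length : Int),
   st.2 ++ [pvNegB (PySem.List.pyGetD c (PySem.Int.mod st.1 (c.length : Int)) "")])

theorem pvDecode_eq (flags : List (List String)) (n k : Int) :
    pvDecodeCombo flags n k =
      (((PySem.List.pyRange (n - 1) (-1) (-1)).foldl (pvStep flags) (k, [])).2).reverse := rfl

-- the accumulated combo is only ever appended to: factor the initial accumulator out
theorem pvStep_acc (flags : List (List String)) (idxs : List Int) (r : Int) (acc : List String) :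
    idxs.foldl (pvStep flags) (r, acc) =
      ((idxs.foldl (pvStep flags) (r, [])).1, acc ++ (idxs.foldl (pvStep flags) (r, [])).2) := by
  induction idxs generalizing r acc with
  | nil => simp
  | cons i is ih =>
    simp only [List.foldl_cons, pvStep]
    rw [ih, ih (acc := [] ++ _)]
    simp

-- A-side lemmas (pvFlagsAnd folds to the product)
theorem pvFlagsAnd_assoc (a b c : List (List String)) :
    pvFlagsAnd (pvFlagsAnd a b) c = pvFlagsAnd a (pvFlagsAnd b c) := by
  simp only [pvFlagsAnd, List.flatMap_map, List.map_flatMap, List.flatMap_assoc]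
  simp [Function.comp_def, List.append_assoc]

theorem pvFlagsAnd_singleton_prod (c : List String) (r : List (List String)) :
    pvFlagsAnd (c.map (fun f => [pvNegA f])) (pvProd r) = pvProd (c.map pvNegA :: r) := by
  simp [pvFlagsAnd, pvProd, List.flatMap_map]

theorem pvFoldl_prod (cs : List (List String)) (acc : List (List String)) :
    (cs.map (fun c => c.map (fun f => [pvNegA f]))).foldl pvFlagsAnd acc =
      pvFlagsAnd acc (pvProd (cs.map (fun c => c.map pvNegA))) := by
  induction cs generalizing acc with
  | nil => simp [pvProd, pvFlagsAnd]
  | cons c cs ih =>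
    simp only [List.map_cons, List.foldl_cons, ih, pvFlagsAnd_assoc,
      pvFlagsAnd_singleton_prod]

theorem flatMap_single {α β : Type} (y : List α) (g : α → β) :
    y.flatMap (fun x => [g x]) = y.map g := by
  induction y with
  | nil => rfl
  | cons a t ih => simp [List.flatMap_cons, ih]

-- snoc form of the product
theorem pvProd_snoc (xs : List (List String)) (y : List String) :
    pvProd (xs ++ [y]) = (pvProd xs).flatMap (fun rest => y.map (fun v => rest ++ [v])) := by
  induction xs with
  | nil => simp [pvProd, flatMap_single]
  | cons x xs ih =>
    simp only [List.cons_append, pvProd, ih, List.map_flatMap, List.flatMap_assoc,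
      List.flatMap_map, List.map_map]
    simp [Function.comp_def]

-- grouping of range over a product
theorem range_mul_flatMap (T m : Nat) :
    List.range (T * m) = (List.range T).flatMap (fun q => (List.range m).map (fun r => q * m + r)) := by
  induction T with
  | zero => simp
  | succ T ih =>
    have h : (T + 1) * m = T * m + m := by ring
    rw [h, List.range_add, ih, List.range_succ, List.flatMap_append]
    simp

theorem map_range_getD {α β : Type} (l : List α) (g : α → β) (d : α) :
    (List.range l.length).map (fun r => g (l.getD r d)) = l.map g := by
  apply List.ext_getElem
  · simp
  · intro i h1 h2
    simp only [List.getElem_map, List.getElem_range]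
    rw [List.getD_eq_getElem?_getD, List.getElem?_eq_getElem (by simpa using h2)]
    simp

-- one snoc step of the decode loop
theorem pvDecode_snoc (gs : List (List String)) (c : List String) (q r : Nat) (hr : r < c.length) :
    pvDecodeCombo (gs ++ [c]) (((gs ++ [c]).length : Nat) : Int) (((q * c.length + r : Nat) : Nat) : Int) =
      pvDecodeCombo gs ((gs.length : Nat) : Int) ((q : Nat) : Int) ++ [pvNegB (c.getD r "")] := by
  have hm : 0 < c.length := by omega
  rw [pvDecode_eq, pvDecode_eq]
  have hlen : (((gs ++ [c]).length : Nat) : Int) - 1 = ((gs.length : Nat) : Int) := by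
    simp [List.length_append]
  rw [hlen, PySem.List.pyRange_neg_one_cons (by omega : (-1 : Int) < ((gs.length : Nat) : Int))]
  simp only [List.foldl_cons]
  have hstep : pvStep (gs ++ [c]) ((((q * c.length + r : Nat) : Nat) : Int), []) ((gs.length : Nat) : Int)
      = (((q : Nat) : Int), [pvNegB (c.getD r "")]) := by
    have hc : PySem.List.pyGetD (gs ++ [c]) ((gs.length : Nat) : Int) ([] : List String) = c := by
      rw [PySem.List.pyGetD_natCast, List.getD_eq_getElem?_getD,
        List.getElem?_append_right (le_refl gs.length)]
      simp
    have h1 : (q * c.length + r) / c.length = q := by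
      rw [Nat.mul_comm q, Nat.mul_add_div hm, Nat.div_eq_of_lt hr, Nat.add_zero]
    have h2 : (q * c.length + r) % c.length = r := by
      rw [Nat.mul_comm q, Nat.mul_add_mod, Nat.mod_eq_of_lt hr]
    simp only [pvStep]
    rw [hc, PySem.Int.floordiv_natCast, PySem.Int.mod_natCast, h1, h2,
      PySem.List.pyGetD_natCast]
    simp
  rw [hstep]
  have hcong : (PySem.List.pyRange (((gs.length : Nat) : Int) - 1) (-1) (-1)).foldl
        (pvStep (gs ++ [c])) (((q : Nat) : Int), [pvNegB (c.getD r "")])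
      = (PySem.List.pyRange (((gs.length : Nat) : Int) - 1) (-1) (-1)).foldl
        (pvStep gs) (((q : Nat) : Int), [pvNegB (c.getD r "")]) := by
    apply PySem.List.foldl_congr_mem
    intro acc i hi
    obtain ⟨hlo, hhi⟩ := PySem.List.mem_pyRange_neg_one.mp hi
    simp only [pvStep]
    have h0 : 0 ≤ i := by omega
    have hlt : i.toNat < gs.length := by omega
    have hget : PySem.List.pyGetD (gs ++ [c]) i ([] : List String) = PySem.List.pyGetD gs i [] := by
      rw [← Int.toNat_of_nonneg h0, PySem.List.pyGetD_natCast, PySem.List.pyGetD_natCast,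
        List.getD_append _ _ _ _ hlt]
    rw [hget]
  rw [hcong, pvStep_acc]
  simp

-- the decode enumeration equals the product of the negated conjuncts
theorem pvDecode_prod (fs : List (List String)) :
    (List.range ((fs.map List.length).prod)).map
        (fun (k : Nat) => pvDecodeCombo fs ((fs.length : Nat) : Int) ((k : Nat) : Int)) =
      pvProd (fs.map (fun c => c.map pvNegB)) := by
  induction fs using List.reverseRecOn with
  | nil => decide
  | append_singleton gs c ih =>
    have hp : (((gs ++ [c]).map List.length).prod : Nat)
        = ((gs.map List.length).prod : Nat) * c.length := by simp
    rw [hp, range_mul_flatMap, List.map_flatMap]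
    have hbody : ∀ q ∈ List.range ((gs.map List.length).prod),
        ((List.range c.length).map (fun r => q * c.length + r)).map
            (fun (k : Nat) => pvDecodeCombo (gs ++ [c]) (((gs ++ [c]).length : Nat) : Int) ((k : Nat) : Int))
          = (c.map pvNegB).map
              (fun v => pvDecodeCombo gs ((gs.length : Nat) : Int) ((q : Nat) : Int) ++ [v]) := by
      intro q _
      rw [List.map_map, List.map_map]
      simp only [Function.comp_def]
      rw [← map_range_getD c
        (fun x => pvDecodeCombo gs ((gs.length : Nat) : Int) ((q : Nat) : Int) ++ [pvNegB x]) ""]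
      exact List.map_congr_left fun r hrm => pvDecode_snoc gs c q r (List.mem_range.mp hrm)
    rw [List.flatMap_congr hbody,
      show ((gs ++ [c]).map (fun c => c.map pvNegB))
          = gs.map (fun c => c.map pvNegB) ++ [c.map pvNegB] from by simp,
      pvProd_snoc, ← ih, List.flatMap_map]

-- total = product of the lengths
theorem foldl_mul_lengths (l : List (List String)) (t : Int) :
    l.foldl (fun t c => t * (c.length : Int)) t = t * (((l.map List.length).prod : Nat) : Int) := by
  induction l generalizing t with
  | nil => simp
  | cons c cs ih =>
    rw [List.foldl_cons, ih]
    simp only [List.map_cons, List.prod_cons]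
    push_cast
    ring

-- B's port computes the product of the negated conjuncts
theorem flags_not_alt_eq_prod (flags : List (List String)) :
    flags_not_alt flags = pvProd (flags.map (fun c => c.map pvNegB)) := by
  simp only [flags_not_alt]
  rw [foldl_mul_lengths, one_mul, PySem.List.pyRange_zero_nat,
    PySem.List.foldl_append_singleton_eq_map, List.nil_append, List.map_map]
  simpa [Function.comp_def] using pvDecode_prod flags

-- ===== VERDICT =====
theorem flags_not_spec : Claim_equal_flags_not := by
  intro flags _ hpre
  unfold Spec_flags_not flags_not
  obtain ⟨hne, -⟩ := hpre
  cases flags with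
  | nil => exact absurd rfl hne
  | cons c cs =>
    simp only [List.map_cons, List.drop_one, List.tail_cons, List.headD_cons]
    rw [pvFoldl_prod, pvFlagsAnd_singleton_prod, flags_not_alt_eq_prod]
    simp only [show pvNegA = pvNegB from funext pvNeg_eq, List.map_cons]
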